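-- pv_equiv track=rewrite | github.com/whanii/ai-agents | ai-agent-trends/scripts/summarize_items.py | _build_summary_provider_lines
-- ===== SOURCE A (Python) =====
-- from collections import defaultdict
-- from typing import Any, Dict, Iterable, List, Tuple
--
-- SUMMARY_PROVIDER_LABELS = {
--     "openai": "OpenAI API",
--     "codex_cli": "Codex CLI",
--     "unavailable": "LLM Unavailable",
-- }
--
-- def _build_summary_provider_lines(items: List[Dict[str, object]]) -> List[str]:
--     if not items:
--         return ["- 상위 리포트 항목이 없어 요약 생성 방식 집계를 표시할 수 없습니다."]
--
--     provider_counts: Dict[str, int] = defaultdict(int)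
--     lines: List[str] = []
--     for item in items:
--         provider = str(item.get("summary_provider", "unavailable"))
--         provider_counts[provider] += 1
--
--     for provider_name in ["openai", "codex_cli", "unavailable"]:
--         count = provider_counts.get(provider_name, 0)
--         lines.append(f"- {SUMMARY_PROVIDER_LABELS[provider_name]}: {count}개")
--
--     return lines
-- ===== SOURCE B (Python) =====
-- SUMMARY_PROVIDER_LABELS = {
--     "openai": "OpenAI API",
--     "codex_cli": "Codex CLI",
--     "unavailable": "LLM Unavailable",
-- }
--
-- def _build_summary_provider_lines(items):
--     if not items:
--         return ["- 상위 리포트 항목이 없어 요약 생성 방식 집계를 표시할 수 없습니다."]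
--     return [
--         f"- {SUMMARY_PROVIDER_LABELS[name]}: {sum(1 for item in items if str(item.get('summary_provider', 'unavailable')) == name)}개"
--         for name in ("openai", "codex_cli", "unavailable")
--     ]
-- ===== Notes on version B (the rewrite author's own statement) =====
-- stated objective: simpler
-- what changed: Replaces the defaultdict tally pass plus dictionary lookups with a single comprehension that, for each of the three fixed provider names, counts matching items by a direct scan and formats the line.
import Mathlib
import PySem

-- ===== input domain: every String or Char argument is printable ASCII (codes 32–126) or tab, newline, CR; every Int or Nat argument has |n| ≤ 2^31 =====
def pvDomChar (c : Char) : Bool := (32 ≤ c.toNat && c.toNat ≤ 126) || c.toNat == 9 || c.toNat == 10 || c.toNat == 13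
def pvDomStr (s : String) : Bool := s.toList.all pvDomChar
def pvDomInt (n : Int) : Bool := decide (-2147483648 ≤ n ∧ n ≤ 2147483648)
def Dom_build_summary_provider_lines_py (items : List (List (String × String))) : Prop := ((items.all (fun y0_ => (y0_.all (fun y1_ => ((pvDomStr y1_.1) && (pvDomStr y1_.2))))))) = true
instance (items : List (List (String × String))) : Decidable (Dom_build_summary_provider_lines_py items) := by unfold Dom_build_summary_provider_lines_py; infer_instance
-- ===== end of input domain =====

-- ===== PORT A =====
-- File: A tallies providers into a dict then looks up three fixed names; B counts each of the three
-- names by a direct scan in a comprehension — simpler, same O(n) cost and identical output.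

-- shared helper: Python's item.get("summary_provider", "unavailable") on an association list (first match)
def pvProviderOf (item : List (String × String)) : String :=
  (PySem.Dict.mk item).getD "summary_provider" "unavailable"

-- SUMMARY_PROVIDER_LABELS[name]; in both programs only the three present keys are looked up, so the
-- default "" is never returned (Python would raise KeyError only for absent keys, which never occurs).
def pvProviderLabel (name : String) : String :=
  (PySem.Dict.ofList [("openai", "OpenAI API"), ("codex_cli", "Codex CLI"), ("unavailable", "LLM Unavailable")]).getD name ""

def build_summary_provider_lines_py (items : List (List (String × String))) : List String :=
  if items = [] then ["- 상위 리포트 항목이 없어 요약 생성 방식 집계를 표시할 수 없습니다."]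
  else
    let provider_counts : PySem.Dict String Int :=
      items.foldl (fun d item => d.modify (pvProviderOf item) 0 (· + 1)) PySem.Dict.empty
    (["openai", "codex_cli", "unavailable"] : List String).foldl
      (fun lines provider_name =>
        lines ++ ["- " ++ pvProviderLabel provider_name ++ ": "
                    ++ PySem.Int.toStr (provider_counts.getD provider_name 0) ++ "개"]) []

-- ===== PORT B =====
def build_summary_provider_lines_py_alt (items : List (List (String × String))) : List String :=
  if items = [] then ["- 상위 리포트 항목이 없어 요약 생성 방식 집계를 표시할 수 없습니다."]
  else
    (["openai", "codex_cli", "unavailable"] : List String).map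
      (fun name =>
        "- " ++ pvProviderLabel name ++ ": "
          ++ PySem.Int.toStr ((items.countP (fun item => pvProviderOf item == name)) : Int) ++ "개")


-- ===== PRECONDITION & SPEC =====
def Spec_build_summary_provider_lines_py (items : List (List (String × String))) (out : List String) : Prop := out = build_summary_provider_lines_py_alt items
instance (items : List (List (String × String))) (out : List String) : Decidable (Spec_build_summary_provider_lines_py items out) := by unfold Spec_build_summary_provider_lines_py; infer_instance

-- ===== CLAIM (what is proved, stated in full; the proofs are below) =====
def Claim_equal_build_summary_provider_lines_py : Prop := ∀ (items : List (List (String × String))), Dom_build_summary_provider_lines_py items → Spec_build_summary_provider_lines_py items (build_summary_provider_lines_py items)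

-- ===== LEMMAS AND PROOFS =====
lemma pv_counts (items : List (List (String × String))) (name : String) :
    (items.foldl (fun d item => d.modify (pvProviderOf item) 0 (· + 1))
        (PySem.Dict.empty : PySem.Dict String Int)).getD name 0
      = ((items.countP (fun item => pvProviderOf item == name)) : Int) := by
  have h := PySem.Dict.getD_foldl_modify_add_one (l := items.map pvProviderOf)
    (d := (PySem.Dict.empty : PySem.Dict String Int)) (v := name)
  rw [List.foldl_map] at h
  rw [h]
  simp only [List.count_eq_countP, List.countP_map, PySem.Dict.getD_empty]
  norm_num
  rfl

-- ===== VERDICT (by name: the statement is the Claim_ definition above) =====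
theorem build_summary_provider_lines_py_spec : Claim_equal_build_summary_provider_lines_py := by
  intro items _
  unfold Spec_build_summary_provider_lines_py build_summary_provider_lines_py build_summary_provider_lines_py_alt
  by_cases h : items = []
  · simp [h]
  · simp only [h, if_false, List.foldl, List.map, pv_counts, List.nil_append, List.cons_append]
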